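-- pv_equiv track=rewrite | github.com/abo238/hw2 | задание 17/7987.py | count_valid_triplets
-- ===== SOURCE A (Python) =====
-- def count_valid_triplets(numbers):
--     min_elem = min(numbers)
--     max_elem = max(numbers)
--     min_remainder = min_elem % 5
--     min_remainder_7 = min_elem % 7
--     max_remainder = max_elem % 7
--     max_remainder_5 = max_elem % 5
--
--     count = 0
--     sum_triplets = 0
--
--     for i in range(len(numbers) - 2):
--         triplet = numbers[i:i+3]
--
--         if not any(100 <= x <= 999 for x in triplet):
--             continue
--
--         count_s1 = sum(1 for x in triplet if x % 5 == min_remainder_7)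
--         if count_s1 > 1:
--             continue
--
--         count_s2 = sum(1 for x in triplet if x % 7 == max_remainder_5)
--         if count_s2 < 2:
--             continue
--
--         count += 1
--         sum_triplets += sum(triplet)
--
--     avg_sum_triplets = sum_triplets // count if count > 0 else 0
--     return count, avg_sum_triplets
-- ===== SOURCE B (Python) =====
-- def _prefix(xs, g):
--     out = [0]
--     for x in xs:
--         out.append(out[-1] + g(x))
--     return out
--
--
-- def count_valid_triplets(numbers):
--     r5 = min(numbers) % 7
--     r7 = max(numbers) % 5
--     P = _prefix(numbers, lambda x: x)
--     C1 = _prefix(numbers, lambda x: 1 if 100 <= x <= 999 else 0)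
--     C5 = _prefix(numbers, lambda x: 1 if x % 5 == r5 else 0)
--     C7 = _prefix(numbers, lambda x: 1 if x % 7 == r7 else 0)
--     count = 0
--     total = 0
--     for i in range(len(numbers) - 2):
--         if C1[i + 3] > C1[i] and C5[i + 3] - C5[i] <= 1 and C7[i + 3] - C7[i] >= 2:
--             count += 1
--             total += P[i + 3] - P[i]
--     return count, total // count if count > 0 else 0
-- ===== Notes on version B (the rewrite author's own statement) =====
-- stated objective: alternative
-- what changed: B builds four cumulative prefix tables (running sum and running counts of the in-range/%5/%7 predicates) in a first stage and then decides each window by subtracting prefix values, instead of A's loop that slices numbers[i:i+3] and re-scans every triplet with three generator passes.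
import Mathlib
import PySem

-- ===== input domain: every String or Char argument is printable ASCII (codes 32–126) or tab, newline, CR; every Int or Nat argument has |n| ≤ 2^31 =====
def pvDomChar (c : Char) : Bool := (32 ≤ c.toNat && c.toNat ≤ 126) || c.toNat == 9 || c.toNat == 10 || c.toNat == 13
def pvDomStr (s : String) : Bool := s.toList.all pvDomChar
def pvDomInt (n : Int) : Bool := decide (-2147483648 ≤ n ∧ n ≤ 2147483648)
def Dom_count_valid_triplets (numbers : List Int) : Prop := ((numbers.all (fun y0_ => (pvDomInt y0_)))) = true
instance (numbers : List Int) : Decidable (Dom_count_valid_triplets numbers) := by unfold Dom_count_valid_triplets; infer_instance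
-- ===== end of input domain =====

-- B replaces A's slice-and-rescan window loop by a staged algorithm: four cumulative
-- prefix tables (running sum, running counts of the three predicates) built first,
-- each window then decided by subtracting two prefix entries; objective: alternative.

-- ===== PORT A =====
-- loop body of A: state (count, sum_triplets), index i
def pvBodyA (numbers : List Int) (r5 r7 : Int) (st : Int × Int) (i : Int) : Int × Int :=
  let triplet := PySem.List.slice numbers (some i) (some (i + 3))
  if ¬ (triplet.any (fun x => decide (100 ≤ x) && decide (x ≤ 999))) then st
  else
    let count_s1 := (triplet.countP (fun x => PySem.Int.mod x 5 == r5) : Int)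
    if count_s1 > 1 then st
    else
      let count_s2 := (triplet.countP (fun x => PySem.Int.mod x 7 == r7) : Int)
      if count_s2 < 2 then st
      else (st.1 + 1, st.2 + triplet.sum)

def count_valid_triplets (numbers : List Int) : Int × Int :=
  match PySem.List.min? numbers (fun x => x), PySem.List.max? numbers (fun x => x) with
  | some min_elem, some max_elem =>
    let _min_remainder := PySem.Int.mod min_elem 5      -- A computes these two and never uses them
    let min_remainder_7 := PySem.Int.mod min_elem 7
    let _max_remainder := PySem.Int.mod max_elem 7
    let max_remainder_5 := PySem.Int.mod max_elem 5
    let st := (PySem.List.pyRange 0 ((numbers.length : Int) - 2) 1).foldl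
      (pvBodyA numbers min_remainder_7 max_remainder_5) (0, 0)
    (st.1, if st.1 > 0 then PySem.Int.floordiv st.2 st.1 else 0)
  | _, _ => (0, 0)    -- unreachable under Pre_ (Python raises ValueError on [])

-- ===== PORT B =====
-- _prefix(xs, g): cumulative table, out[0]=0, out[k+1]=out[k]+g(xs[k])
def pvPrefix (g : Int → Int) (acc : Int) : List Int → List Int
  | [] => [acc]
  | x :: t => acc :: pvPrefix g (acc + g x) t

-- loop body of B's second stage; range indices are ≥ 0 and in bounds, so .toNat/getD are exact there
def pvBodyB (P C1 C5 C7 : List Int) (st : Int × Int) (i : Int) : Int × Int :=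
  if C1.getD (i + 3).toNat 0 > C1.getD i.toNat 0
      ∧ C5.getD (i + 3).toNat 0 - C5.getD i.toNat 0 ≤ 1
      ∧ C7.getD (i + 3).toNat 0 - C7.getD i.toNat 0 ≥ 2
  then (st.1 + 1, st.2 + (P.getD (i + 3).toNat 0 - P.getD i.toNat 0))
  else st

def count_valid_triplets_alt (numbers : List Int) : Int × Int :=
  match PySem.List.min? numbers (fun x => x) with
  | none => (0, 0)    -- unreachable under Pre_ (Python raises ValueError on [])
  | some lo =>
    match PySem.List.max? numbers (fun x => x) with
    | none => (0, 0)
    | some hi =>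
    let r5 := PySem.Int.mod lo 7
    let r7 := PySem.Int.mod hi 5
    let P := pvPrefix (fun x => x) 0 numbers
    let C1 := pvPrefix (fun x => if 100 ≤ x ∧ x ≤ 999 then 1 else 0) 0 numbers
    let C5 := pvPrefix (fun x => if PySem.Int.mod x 5 == r5 then 1 else 0) 0 numbers
    let C7 := pvPrefix (fun x => if PySem.Int.mod x 7 == r7 then 1 else 0) 0 numbers
    let st := (PySem.List.pyRange 0 ((numbers.length : Int) - 2) 1).foldl
      (pvBodyB P C1 C5 C7) (0, 0)
    (st.1, if st.1 > 0 then PySem.Int.floordiv st.2 st.1 else 0)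

-- ===== PRECONDITION & SPEC =====
-- Pre_ excludes only the empty list, on which Python's min() (in both A and B) raises ValueError.
def Pre_count_valid_triplets (numbers : List Int) : Prop := numbers ≠ []
instance (numbers : List Int) : Decidable (Pre_count_valid_triplets numbers) := by unfold Pre_count_valid_triplets; infer_instance
def pvWitness_count_valid_triplets : List Int := [100, 105, 210]

def Spec_count_valid_triplets (numbers : List Int) (out : Int × Int) : Prop := out = count_valid_triplets_alt numbers
instance (numbers : List Int) (out : Int × Int) : Decidable (Spec_count_valid_triplets numbers out) := by unfold Spec_count_valid_triplets; infer_instance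

-- ===== CLAIM (what is proved, stated in full; the proofs are below) =====
def Claim_equal_count_valid_triplets : Prop := ∀ (numbers : List Int), Dom_count_valid_triplets numbers → Pre_count_valid_triplets numbers → Spec_count_valid_triplets numbers (count_valid_triplets numbers)

-- ===== LEMMAS AND PROOFS =====

-- the list of consecutive triples, the common reference shape of both loops
def pvTriples : List Int → List (Int × Int × Int)
  | a :: b :: c :: t => (a, b, c) :: pvTriples (b :: c :: t)
  | _ => []

-- the reference per-triple step both loops are reduced to
def pvTripFold (gP g1 g5 g7 : Int → Int) (st : Int × Int) (t : Int × Int × Int) : Int × Int :=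
  if g1 t.1 + g1 t.2.1 + g1 t.2.2 > 0
      ∧ g5 t.1 + g5 t.2.1 + g5 t.2.2 ≤ 1
      ∧ g7 t.1 + g7 t.2.1 + g7 t.2.2 ≥ 2
  then (st.1 + 1, st.2 + (gP t.1 + gP t.2.1 + gP t.2.2))
  else st

theorem pv_slice3_shift (a : Int) (xs : List Int) (k : Nat) :
    PySem.List.slice (a :: xs) (some ((k : Int) + 1)) (some ((k : Int) + 1 + 3))
      = PySem.List.slice xs (some (k : Int)) (some ((k : Int) + 3)) := by
  rw [PySem.List.slice_toNat _ (by omega) (by omega), PySem.List.slice_toNat _ (by omega) (by omega)]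
  have h1 : ((k : Int) + 1).toNat = k + 1 := by omega
  have h2 : ((k : Int) + 1 + 3).toNat = k + 4 := by omega
  have h3 : ((k : Int)).toNat = k := by omega
  have h4 : ((k : Int) + 3).toNat = k + 3 := by omega
  simp [h1, h2, h3, h4]

theorem pv_slice3_zero (a b c : Int) (t : List Int) :
    PySem.List.slice (a :: b :: c :: t) (some 0) (some (0 + 3)) = [a, b, c] := by
  rw [PySem.List.slice_toNat _ (by omega) (by omega)]; simp [List.take]

theorem pvBodyA_cons (a : Int) (xs : List Int) (r5 r7 : Int) (st : Int × Int) (k : Nat) :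
    pvBodyA (a :: xs) r5 r7 st ((k : Int) + 1) = pvBodyA xs r5 r7 st (k : Int) := by
  unfold pvBodyA
  rw [pv_slice3_shift]

theorem pv_loopA_eq (r5 r7 : Int) : ∀ (xs : List Int) (st : Int × Int),
    (PySem.List.pyRange 0 ((xs.length : Int) - 2) 1).foldl (pvBodyA xs r5 r7) st
      = (pvTriples xs).foldl (fun st t => pvBodyA [t.1, t.2.1, t.2.2] r5 r7 st 0) st := by
  intro xs
  induction xs using pvTriples.induct with
  | case1 a b c t ih =>
    intro st
    rw [PySem.List.pyRange_one, List.foldl_map]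
    have hlen : ((((a :: b :: c :: t).length : Int) - 2) - 0).toNat
        = ((((b :: c :: t).length : Int) - 2) - 0).toNat + 1 := by simp; omega
    rw [hlen, List.range_succ_eq_map, List.foldl_cons, List.foldl_map]
    have hfun : (fun (s : Int × Int) (k : Nat) => pvBodyA (a :: b :: c :: t) r5 r7 s (0 + (k.succ : Int)))
        = fun (s : Int × Int) (k : Nat) => pvBodyA (b :: c :: t) r5 r7 s (0 + (k : Int)) := by
      funext s k
      have h : (0 : Int) + (k.succ : Int) = (k : Int) + 1 := by push_cast; ring
      rw [h, pvBodyA_cons, zero_add]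
    rw [hfun]
    have := ih (pvBodyA (a :: b :: c :: t) r5 r7 st ((0 : Nat) : Int))
    rw [PySem.List.pyRange_one, List.foldl_map] at this
    simp only [Nat.cast_zero, add_zero, zero_add] at this ⊢
    rw [this]
    simp only [pvTriples, List.foldl_cons]
    congr 1
  | case2 xs h1 =>
    intro st
    have hlen : ((((xs).length : Int) - 2) - 0).toNat = 0 := by
      match xs, h1 with
      | [], _ => simp
      | [x], _ => simp
      | [x, y], _ => simp
      | x :: y :: z :: t, h => exact absurd rfl (h x y z t)
    rw [PySem.List.pyRange_one, hlen]
    have htr : pvTriples xs = [] := by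
      match xs, h1 with
      | [], _ => rfl
      | [x], _ => rfl
      | [x, y], _ => rfl
      | x :: y :: z :: t, h => exact absurd rfl (h x y z t)
    rw [htr]
    simp

-- ---- prefix-table lemmas for B ----

theorem pvPrefix_length (g : Int → Int) (c : Int) (xs : List Int) :
    (pvPrefix g c xs).length = xs.length + 1 := by
  induction xs generalizing c with
  | nil => rfl
  | cons x t ih => simp [pvPrefix, ih]

theorem pvPrefix_shift (g : Int → Int) (c : Int) (xs : List Int) :
    pvPrefix g c xs = (pvPrefix g 0 xs).map (fun v => c + v) := by
  induction xs generalizing c with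
  | nil => simp [pvPrefix]
  | cons x t ih =>
    simp only [pvPrefix, List.map_cons, add_zero, zero_add]
    congr 1
    rw [ih (c + g x), ih (g x), List.map_map]
    congr 1
    funext v
    simp; ring

theorem pv_getD_map_add (c : Int) (L : List Int) (k : Nat) (h : k < L.length) :
    (L.map (fun v => c + v)).getD k 0 = c + L.getD k 0 := by
  rw [List.getD_eq_getElem _ _ (by simpa using h), List.getD_eq_getElem _ _ h, List.getElem_map]

theorem pvPrefix_getD_cons (g : Int → Int) (a : Int) (xs : List Int) (j : Nat)
    (hj : j ≤ xs.length) :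
    (pvPrefix g 0 (a :: xs)).getD (j + 1) 0 = g a + (pvPrefix g 0 xs).getD j 0 := by
  show (0 :: pvPrefix g (0 + g a) xs).getD (j + 1) 0 = _
  rw [List.getD_cons_succ, pvPrefix_shift g (0 + g a),
    pv_getD_map_add _ _ _ (by rw [pvPrefix_length]; omega)]
  ring

theorem pvBodyB_cons (gP g1 g5 g7 : Int → Int) (a : Int) (xs : List Int)
    (st : Int × Int) (k : Nat) (h : k + 3 ≤ xs.length) :
    pvBodyB (pvPrefix gP 0 (a :: xs)) (pvPrefix g1 0 (a :: xs))
        (pvPrefix g5 0 (a :: xs)) (pvPrefix g7 0 (a :: xs)) st ((k : Int) + 1)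
      = pvBodyB (pvPrefix gP 0 xs) (pvPrefix g1 0 xs)
        (pvPrefix g5 0 xs) (pvPrefix g7 0 xs) st (k : Int) := by
  unfold pvBodyB
  have h1 : ((k : Int) + 1 + 3).toNat = (k + 3) + 1 := by omega
  have h2 : ((k : Int) + 1).toNat = k + 1 := by omega
  have h3 : ((k : Int) + 3).toNat = k + 3 := by omega
  have h4 : ((k : Int)).toNat = k := by omega
  rw [h1, h2, h3, h4,
    pvPrefix_getD_cons gP a xs (k + 3) h, pvPrefix_getD_cons gP a xs k (by omega),
    pvPrefix_getD_cons g1 a xs (k + 3) h, pvPrefix_getD_cons g1 a xs k (by omega),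
    pvPrefix_getD_cons g5 a xs (k + 3) h, pvPrefix_getD_cons g5 a xs k (by omega),
    pvPrefix_getD_cons g7 a xs (k + 3) h, pvPrefix_getD_cons g7 a xs k (by omega)]
  have he : gP a + (pvPrefix gP 0 xs).getD (k + 3) 0 - (gP a + (pvPrefix gP 0 xs).getD k 0)
      = (pvPrefix gP 0 xs).getD (k + 3) 0 - (pvPrefix gP 0 xs).getD k 0 := by ring
  rw [he]
  exact if_congr (by omega) rfl rfl

theorem pvPrefix_getD_zero (g : Int → Int) (acc : Int) (t : List Int) :
    (pvPrefix g acc t).getD 0 0 = acc := by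
  cases t <;> rfl

theorem pvBodyB_zero (gP g1 g5 g7 : Int → Int) (a b c : Int) (t : List Int) (st : Int × Int) :
    pvBodyB (pvPrefix gP 0 (a :: b :: c :: t)) (pvPrefix g1 0 (a :: b :: c :: t))
        (pvPrefix g5 0 (a :: b :: c :: t)) (pvPrefix g7 0 (a :: b :: c :: t)) st 0
      = pvTripFold gP g1 g5 g7 st (a, b, c) := by
  unfold pvBodyB pvTripFold
  rw [show ((0 : Int) + 3).toNat = 3 from rfl, show ((0 : Int)).toNat = 0 from rfl]
  simp only [pvPrefix, List.getD_cons_succ, List.getD_cons_zero, pvPrefix_getD_zero]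
  have he : (0 : Int) + gP a + gP b + gP c - 0 = gP a + gP b + gP c := by ring
  rw [he]
  exact if_congr (by omega) rfl rfl

theorem pv_loopB_eq (gP g1 g5 g7 : Int → Int) : ∀ (xs : List Int) (st : Int × Int),
    (PySem.List.pyRange 0 ((xs.length : Int) - 2) 1).foldl
        (pvBodyB (pvPrefix gP 0 xs) (pvPrefix g1 0 xs) (pvPrefix g5 0 xs) (pvPrefix g7 0 xs)) st
      = (pvTriples xs).foldl (pvTripFold gP g1 g5 g7) st := by
  intro xs
  induction xs using pvTriples.induct with
  | case1 a b c t ih =>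
    intro st
    rw [PySem.List.pyRange_one, List.foldl_map]
    have hlen : ((((a :: b :: c :: t).length : Int) - 2) - 0).toNat
        = ((((b :: c :: t).length : Int) - 2) - 0).toNat + 1 := by simp; omega
    rw [hlen, List.range_succ_eq_map, List.foldl_cons, List.foldl_map]
    have hcong := PySem.List.foldl_congr_mem
      (List.range ((((b :: c :: t).length : Int) - 2) - 0).toNat)
      (fun (s : Int × Int) (k : Nat) =>
        pvBodyB (pvPrefix gP 0 (a :: b :: c :: t)) (pvPrefix g1 0 (a :: b :: c :: t))
          (pvPrefix g5 0 (a :: b :: c :: t)) (pvPrefix g7 0 (a :: b :: c :: t)) s (0 + (k.succ : Int)))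
      (fun (s : Int × Int) (k : Nat) =>
        pvBodyB (pvPrefix gP 0 (b :: c :: t)) (pvPrefix g1 0 (b :: c :: t))
          (pvPrefix g5 0 (b :: c :: t)) (pvPrefix g7 0 (b :: c :: t)) s (0 + (k : Int)))
      (pvBodyB (pvPrefix gP 0 (a :: b :: c :: t)) (pvPrefix g1 0 (a :: b :: c :: t))
          (pvPrefix g5 0 (a :: b :: c :: t)) (pvPrefix g7 0 (a :: b :: c :: t)) st (0 + ((0 : Nat) : Int)))
      (by
        intro s k hk
        simp only []
        have hk' : k < ((((b :: c :: t).length : Int) - 2) - 0).toNat := List.mem_range.mp hk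
        have hb : k + 3 ≤ (b :: c :: t).length := by simp at hk' ⊢; omega
        have h : (0 : Int) + (k.succ : Int) = (k : Int) + 1 := by push_cast; ring
        rw [h, pvBodyB_cons gP g1 g5 g7 a _ s k hb, zero_add])
    rw [hcong]
    have := ih (pvBodyB (pvPrefix gP 0 (a :: b :: c :: t)) (pvPrefix g1 0 (a :: b :: c :: t))
        (pvPrefix g5 0 (a :: b :: c :: t)) (pvPrefix g7 0 (a :: b :: c :: t)) st ((0 : Nat) : Int))
    rw [PySem.List.pyRange_one, List.foldl_map] at this
    simp only [Nat.cast_zero, zero_add] at this ⊢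
    rw [this]
    simp only [pvTriples, List.foldl_cons]
    rw [pvBodyB_zero]
  | case2 xs h1 =>
    intro st
    have hlen : ((((xs).length : Int) - 2) - 0).toNat = 0 := by
      match xs, h1 with
      | [], _ => simp
      | [x], _ => simp
      | [x, y], _ => simp
      | x :: y :: z :: t, h => exact absurd rfl (h x y z t)
    rw [PySem.List.pyRange_one, hlen]
    have htr : pvTriples xs = [] := by
      match xs, h1 with
      | [], _ => rfl
      | [x], _ => rfl
      | [x, y], _ => rfl
      | x :: y :: z :: t, h => exact absurd rfl (h x y z t)
    rw [htr]
    simp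

-- ---- per-triple agreement of the two bodies ----

theorem pv_cnt3 (f : Int → Bool) (a b c : Int) :
    ((List.countP f [a, b, c] : Nat) : Int)
      = (if f a then (1 : Int) else 0) + (if f b then 1 else 0) + (if f c then 1 else 0) := by
  cases hfa : f a <;> cases hfb : f b <;> cases hfc : f c <;>
    simp [hfa, hfb, hfc]

theorem pv_any3 (a b c : Int) :
    ((List.any [a, b, c] fun x => decide (100 ≤ x) && decide (x ≤ 999)) = true)
      ↔ (if 100 ≤ a ∧ a ≤ 999 then (1 : Int) else 0) + (if 100 ≤ b ∧ b ≤ 999 then 1 else 0)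
          + (if 100 ≤ c ∧ c ≤ 999 then 1 else 0) > 0 := by
  by_cases ha : 100 ≤ a ∧ a ≤ 999 <;> by_cases hb : 100 ≤ b ∧ b ≤ 999 <;>
    by_cases hc : 100 ≤ c ∧ c ≤ 999 <;>
    simp [List.any_cons, ha, hb, hc]

theorem pv_body_eq (r5 r7 : Int) (st : Int × Int) (t : Int × Int × Int) :
    pvBodyA [t.1, t.2.1, t.2.2] r5 r7 st 0
      = pvTripFold (fun x => x) (fun x => if 100 ≤ x ∧ x ≤ 999 then 1 else 0)
          (fun x => if PySem.Int.mod x 5 == r5 then 1 else 0)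
          (fun x => if PySem.Int.mod x 7 == r7 then 1 else 0) st t := by
  obtain ⟨a, b, c⟩ := t
  simp only [pvBodyA, pvTripFold]
  rw [pv_slice3_zero a b c []]
  rw [pv_cnt3 (fun x => PySem.Int.mod x 5 == r5), pv_cnt3 (fun x => PySem.Int.mod x 7 == r7)]
  simp only [pv_any3, List.sum_cons, List.sum_nil, add_zero]
  generalize (if 100 ≤ a ∧ a ≤ 999 then (1 : Int) else 0) + (if 100 ≤ b ∧ b ≤ 999 then 1 else 0)
      + (if 100 ≤ c ∧ c ≤ 999 then 1 else 0) = s1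
  generalize (if PySem.Int.mod a 5 == r5 then (1 : Int) else 0)
      + (if PySem.Int.mod b 5 == r5 then 1 else 0)
      + (if PySem.Int.mod c 5 == r5 then 1 else 0) = s5
  generalize (if PySem.Int.mod a 7 == r7 then (1 : Int) else 0)
      + (if PySem.Int.mod b 7 == r7 then 1 else 0)
      + (if PySem.Int.mod c 7 == r7 then 1 else 0) = s7
  split_ifs <;>
    first
      | rfl
      | (exfalso; omega)
      | (simp only [Prod.mk.injEq, true_and]; ring_nf)

-- ===== VERDICT (by name: the statement is the Claim_ definition above) =====
theorem count_valid_triplets_spec : Claim_equal_count_valid_triplets := by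
  intro numbers _hdom _hpre
  unfold Spec_count_valid_triplets count_valid_triplets count_valid_triplets_alt
  cases hmin : PySem.List.min? numbers (fun x => x) with
  | none => rfl
  | some lo =>
    cases hmax : PySem.List.max? numbers (fun x => x) with
    | none => rfl
    | some hi =>
      simp only []
      rw [pv_loopA_eq, pv_loopB_eq]
      have hfold := PySem.List.foldl_congr_mem (pvTriples numbers)
        (fun st t => pvBodyA [t.1, t.2.1, t.2.2] (PySem.Int.mod lo 7) (PySem.Int.mod hi 5) st 0)
        (pvTripFold (fun x => x) (fun x => if 100 ≤ x ∧ x ≤ 999 then 1 else 0)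
          (fun x => if PySem.Int.mod x 5 == PySem.Int.mod lo 7 then 1 else 0)
          (fun x => if PySem.Int.mod x 7 == PySem.Int.mod hi 5 then 1 else 0)) (0, 0)
        (fun st t _ => pv_body_eq (PySem.Int.mod lo 7) (PySem.Int.mod hi 5) st t)
      rw [hfold]
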